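-- pv_equiv track=rewrite | github.com/dilab-masters/SESE | SESE.py | make_quotes_w2v_video
-- ===== SOURCE A (Python) =====
-- def make_quotes_w2v_video(video_path, ls):
--     quote = "SELECT captions_starts, captions_ends, en_captions FROM activitynet WHERE video_path = '{}' AND (en_captions LIKE '%{}%'".format(video_path, ls[0])
--     if len(ls)>1:
--         for idx, word in enumerate(ls):
--             if idx > 0:
--                 if idx %2 != 0:
--                     special_token = " OR en_captions LIKE '%{}%')".format(ls[idx])
--                 if idx %2 == 0 :
--                     special_token = " AND (en_captions LIKE '%{}%'".format(ls[idx])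
--                 quote += special_token
--     return quote
-- ===== SOURCE B (Python) =====
-- def make_quotes_w2v_video(video_path, ls):
--     parts = ["SELECT captions_starts, captions_ends, en_captions FROM activitynet WHERE video_path = '{}' AND (en_captions LIKE '%{}%'".format(video_path, ls[0])]
--     rest = iter(ls[1:])
--     for a in rest:
--         parts.append(" OR en_captions LIKE '%{}%')".format(a))
--         b = next(rest, None)
--         if b is not None:
--             parts.append(" AND (en_captions LIKE '%{}%'".format(b))
--     return "".join(parts)
-- ===== Notes on version B (the rewrite author's own statement) =====
-- stated objective: simpler
-- what changed: Replaces the flat enumerate loop with idx-parity branching by a pair-consuming loop over the tail (OR clause, optional AND clause, drop two) collected into a list joined once; no index arithmetic.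
import Mathlib
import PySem

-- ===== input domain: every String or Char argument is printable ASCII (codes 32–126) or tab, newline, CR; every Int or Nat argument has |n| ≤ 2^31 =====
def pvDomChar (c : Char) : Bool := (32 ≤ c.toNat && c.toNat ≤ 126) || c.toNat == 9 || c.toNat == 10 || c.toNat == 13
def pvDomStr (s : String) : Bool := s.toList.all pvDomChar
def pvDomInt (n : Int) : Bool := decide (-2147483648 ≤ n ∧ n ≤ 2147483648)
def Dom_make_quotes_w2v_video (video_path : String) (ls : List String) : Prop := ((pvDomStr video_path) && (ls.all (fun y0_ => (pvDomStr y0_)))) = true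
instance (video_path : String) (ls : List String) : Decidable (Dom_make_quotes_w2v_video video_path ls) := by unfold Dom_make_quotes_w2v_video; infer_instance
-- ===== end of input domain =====

-- B change: pair-consuming loop over the tail with a single join, instead of A's flat
-- enumerate loop with idx-parity branching (objective: simpler). Pre_ excludes the empty
-- list, on which the Python A raises IndexError (ls[0]).


-- ===== PORT A =====
-- shared format-string pieces (Python .format is string concatenation on this ASCII domain)
def pvPrefix (video_path w0 : String) : String :=
  "SELECT captions_starts, captions_ends, en_captions FROM activitynet WHERE video_path = '" ++ video_path ++ "' AND (en_captions LIKE '%" ++ w0 ++ "%'"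
def pvOrTok (w : String) : String := " OR en_captions LIKE '%" ++ w ++ "%')"
def pvAndTok (w : String) : String := " AND (en_captions LIKE '%" ++ w ++ "%'"

def make_quotes_w2v_video (video_path : String) (ls : List String) : String :=
  match ls with
  | [] => ""  -- Python raises IndexError on ls[0]; excluded by Pre_
  | w0 :: _ =>
    let quote := pvPrefix video_path w0
    if ls.length > 1 then
      (PySem.List.enumerate ls).foldl (fun quote p =>
        if p.1 > 0 then
          -- ls[idx] = word here, since p.1 is exactly the enumerate index of p.2
          quote ++ (if p.1 % 2 ≠ 0 then pvOrTok p.2 else pvAndTok p.2)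
        else quote) quote
    else quote

-- ===== PORT B =====
-- Source B's pair-consuming loop over the tail: OR clause, optional AND clause, two at a time
def pvPairParts : List String → List String
  | [] => []
  | [a] => [pvOrTok a]
  | a :: b :: rest => pvOrTok a :: pvAndTok b :: pvPairParts rest

def make_quotes_w2v_video_alt (video_path : String) (ls : List String) : String :=
  match ls with
  | [] => ""  -- Source B raises IndexError on ls[0]; excluded by Pre_
  | head :: rest => String.join (pvPrefix video_path head :: pvPairParts rest)

-- ===== PRECONDITION & SPEC =====
-- Pre_ excludes only the empty list, on which both Pythons raise IndexError at ls[0].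
def Pre_make_quotes_w2v_video (video_path : String) (ls : List String) : Prop := ls ≠ []
instance (video_path : String) (ls : List String) : Decidable (Pre_make_quotes_w2v_video video_path ls) := by unfold Pre_make_quotes_w2v_video; infer_instance
def pvWitness_make_quotes_w2v_video : String × List String := ("v.mp4", ["dog", "cat", "run"])

def Spec_make_quotes_w2v_video (video_path : String) (ls : List String) (out : String) : Prop := out = make_quotes_w2v_video_alt video_path ls
instance (video_path : String) (ls : List String) (out : String) : Decidable (Spec_make_quotes_w2v_video video_path ls out) := by unfold Spec_make_quotes_w2v_video; infer_instance

-- ===== CLAIM (what is proved, stated in full; the proofs are below) =====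
def Claim_equal_make_quotes_w2v_video : Prop := ∀ (video_path : String) (ls : List String), Dom_make_quotes_w2v_video video_path ls → Pre_make_quotes_w2v_video video_path ls → Spec_make_quotes_w2v_video video_path ls (make_quotes_w2v_video video_path ls)

-- ===== LEMMAS AND PROOFS =====

theorem pvFoldl_append (l : List String) : ∀ (a : String),
    l.foldl (· ++ ·) a = a ++ l.foldl (· ++ ·) "" := by
  induction l with
  | nil => intro a; simp
  | cons x t ih =>
    intro a
    rw [List.foldl_cons, ih (a ++ x), List.foldl_cons, ih ("" ++ x)]
    simp [String.append_assoc]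

theorem pvJoin_cons (a : String) (l : List String) :
    String.join (a :: l) = a ++ String.join l := by
  simp only [String.join, List.foldl_cons]
  rw [pvFoldl_append l ("" ++ a)]
  simp

-- tokens emitted by A's loop starting at index k
def pvTokFrom (k : Int) : List String → String
  | [] => ""
  | w :: t => (if k % 2 ≠ 0 then pvOrTok w else pvAndTok w) ++ pvTokFrom (k + 1) t

theorem pvFoldl_tokFrom (t : List String) : ∀ (k : Int) (q : String), 0 < k →
    (PySem.List.enumerate t k).foldl (fun quote p =>
      if p.1 > 0 then quote ++ (if p.1 % 2 ≠ 0 then pvOrTok p.2 else pvAndTok p.2) else quote) q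
      = q ++ pvTokFrom k t := by
  induction t with
  | nil => intro k q _; simp [PySem.List.enumerate, pvTokFrom]
  | cons w t ih =>
    intro k q hk
    rw [PySem.List.enumerate_cons, List.foldl_cons, ih (k+1) _ (by omega)]
    simp [pvTokFrom, hk, String.append_assoc]

theorem pvTokFrom_odd (t : List String) : ∀ (k : Int), k % 2 = 1 →
    pvTokFrom k t = String.join (pvPairParts t) := by
  induction t using pvPairParts.induct with
  | case1 => intro k _; simp [pvTokFrom, pvPairParts, String.join]
  | case2 a =>
    intro k hk
    simp [pvTokFrom, pvPairParts, String.join, hk]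
  | case3 a b rest ih =>
    intro k hk
    have hk1 : (k + 1) % 2 = 0 := by omega
    have hk2 : (k + 2) % 2 = 1 := by omega
    simp only [pvTokFrom, pvPairParts, hk, hk1]
    rw [show k + 1 + 1 = k + 2 by ring, ih (k + 2) hk2,
      pvJoin_cons, pvJoin_cons]
    simp

-- ===== VERDICT (by name: the statement is the Claim_ definition above) =====
theorem make_quotes_w2v_video_spec : Claim_equal_make_quotes_w2v_video := by
  intro video_path ls _ hpre
  unfold Spec_make_quotes_w2v_video
  match ls with
  | [] => exact absurd rfl hpre
  | w0 :: rest =>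
    simp only [make_quotes_w2v_video, make_quotes_w2v_video_alt]
    cases rest with
    | nil => simp [String.join, pvPairParts]
    | cons b t =>
      have hlen : (w0 :: b :: t).length > 1 := by simp
      rw [if_pos hlen, PySem.List.enumerate_cons, List.foldl_cons,
        if_neg (by omega : ¬((0:Int) > 0)), show (0:Int) + 1 = 1 from rfl,
        pvFoldl_tokFrom (b :: t) 1 _ (by omega), pvTokFrom_odd (b :: t) 1 (by omega),
        pvJoin_cons]
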